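/-
  jsmn ALWAYS STOPS (for a text shorter than 2^32 bytes and a state satisfying `Inv`), and what it returns.

  1. FUEL MONOTONICITY: an answer `some r` of any of the model's fuelled functions stays the same with more fuel
     (`primScan_mono`, `strScan_mono`, `closeLinks_mono`, `parsePrimitive_mono`, `parseString_mono`, `primitiveCase_mono`, `body_mono`,
     `loop_mono`, `parseFuel_mono`).
  2. PROGRESS: every trip through the body of jsmn_parse's loop that goes on leaves `pos` inside the text and not before where it was
     (`body_next`), and ends (`body_total`). The inner loops are in Json/Jsmn/TotalSub.lean.
  3. TERMINATION: `parse_total` — the fuel `js.length + 1` of `parse` is enough.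
  4. THE RESULT: `parse_result` — a non-negative count (with tokens: the new `toknext`) or one of the three error codes.
-/
import Json.Jsmn.TotalSub

namespace Jsmn

/-! ### 1. fuel monotonicity -/

/-- More fuel does not change an answer of `primScan`. -/
theorem primScan_mono {cfg : Config} {js : List UInt8} {fuel fuel' pos : Nat} {r : PrimScan}
    (h : primScan cfg js fuel pos = some r) (hle : fuel ≤ fuel') : primScan cfg js fuel' pos = some r := by
  induction fuel generalizing pos fuel' with
  | zero => simp [primScan] at h
  | succ f ih =>
    obtain ⟨f', rfl⟩ : ∃ f', fuel' = f' + 1 := ⟨fuel' - 1, by omega⟩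
    have hf : f ≤ f' := by omega
    rw [primScan] at h ⊢
    simp only [] at h ⊢
    repeat' split
    all_goals first | (simp_all; done) | (simp_all; exact ih h hf)

/-- More fuel does not change an answer of `strScan`. -/
theorem strScan_mono {js : List UInt8} {fuel fuel' pos : Nat} {r : StrScan}
    (h : strScan js fuel pos = some r) (hle : fuel ≤ fuel') : strScan js fuel' pos = some r := by
  induction fuel generalizing pos fuel' with
  | zero => simp [strScan] at h
  | succ f ih =>
    obtain ⟨f', rfl⟩ : ∃ f', fuel' = f' + 1 := ⟨fuel' - 1, by omega⟩
    rw [strScan] at h ⊢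
    have hf : f ≤ f' := by omega
    simp only [] at h ⊢
    repeat' split
    all_goals first | (simp_all; done) | (simp_all; exact ih h hf)

/-- More fuel does not change an answer of `closeLinks`. -/
theorem closeLinks_mono {type : Nat} {s : St} {ts : Tokens} {fuel fuel' : Nat} {idx : Int} {r : Step}
    (h : closeLinks type s ts fuel idx = some r) (hle : fuel ≤ fuel') : closeLinks type s ts fuel' idx = some r := by
  induction fuel generalizing idx fuel' with
  | zero => simp [closeLinks] at h
  | succ f ih =>
    obtain ⟨f', rfl⟩ : ∃ f', fuel' = f' + 1 := ⟨fuel' - 1, by omega⟩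
    rw [closeLinks] at h ⊢
    have hf : f ≤ f' := by omega
    simp only [] at h ⊢
    repeat' split
    all_goals first | (simp_all; done) | (simp_all; exact ih h hf)

/-- More fuel does not change an answer of `parsePrimitive`. -/
theorem parsePrimitive_mono {cfg : Config} {js : List UInt8} {fuel fuel' : Nat} {p : Parser} {toks : Option Tokens} {n : Nat}
    {r : Int × Parser × Option Tokens}
    (h : parsePrimitive cfg js fuel p toks n = some r) (hle : fuel ≤ fuel') : parsePrimitive cfg js fuel' p toks n = some r := by
  unfold parsePrimitive at h ⊢
  cases hs : primScan cfg js fuel p.pos with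
  | none => simp [hs] at h
  | some x => simp only [hs, primScan_mono hs hle] at h ⊢; exact h

/-- More fuel does not change an answer of `parseString`. -/
theorem parseString_mono {cfg : Config} {js : List UInt8} {fuel fuel' : Nat} {p : Parser} {toks : Option Tokens} {n : Nat}
    {r : Int × Parser × Option Tokens}
    (h : parseString cfg js fuel p toks n = some r) (hle : fuel ≤ fuel') : parseString cfg js fuel' p toks n = some r := by
  unfold parseString at h ⊢
  cases hs : strScan js fuel (u32 (p.pos + 1)) with
  | none => simp [hs] at h
  | some x => simp only [hs, strScan_mono hs hle] at h ⊢; exact h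

/-- More fuel does not change an answer of `primitiveCase`. -/
theorem primitiveCase_mono {cfg : Config} {js : List UInt8} {fuel fuel' n : Nat} {s : St} {r : Step}
    (h : primitiveCase cfg js fuel n s = some r) (hle : fuel ≤ fuel') : primitiveCase cfg js fuel' n s = some r := by
  unfold primitiveCase at h ⊢
  cases hs : parsePrimitive cfg js fuel s.p s.toks n with
  | none => simp [hs] at h
  | some x => simp only [hs, parsePrimitive_mono hs hle] at h ⊢; exact h

/-- More fuel does not change an answer of `body`. -/
theorem body_mono {cfg : Config} {js : List UInt8} {fuel fuel' n : Nat} {s : St} {c : UInt8} {r : Step}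
    (h : body cfg js fuel n s c = some r) (hle : fuel ≤ fuel') : body cfg js fuel' n s c = some r := by
  have hprim : ∀ r, primitiveCase cfg js fuel n s = some r → primitiveCase cfg js fuel' n s = some r :=
    fun r h => primitiveCase_mono h hle
  unfold body at h ⊢
  split at h
  · rename_i h1; rw [if_pos h1]; exact h
  rename_i h1; rw [if_neg h1]
  split at h
  · rename_i h2; rw [if_pos h2]; exact h
  rename_i h2; rw [if_neg h2]
  split at h
  · rename_i h3; rw [if_pos h3]
    cases hs : parseString cfg js fuel s.p s.toks n with
    | none => simp [hs] at h
    | some x => simp only [hs, parseString_mono hs hle] at h ⊢; exact h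
  rename_i h3; rw [if_neg h3]
  split at h
  · rename_i h4; rw [if_pos h4]; exact h
  rename_i h4; rw [if_neg h4]
  split at h
  · rename_i h5; rw [if_pos h5]; exact h
  rename_i h5; rw [if_neg h5]
  split at h
  · rename_i h6; rw [if_pos h6]; exact h
  rename_i h6; rw [if_neg h6]
  split at h
  · rename_i h7; rw [if_pos h7]
    split at h
    · rename_i h8; rw [if_pos h8]
      simp only [] at h ⊢
      split at h
      · simp only [Bool.false_eq_true, if_false] at h ⊢; exact hprim _ h
      · split at h
        · rename_i h9; rw [if_pos h9]; exact h
        · rename_i h9; rw [if_neg h9]; exact hprim _ h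
    · rename_i h8; rw [if_neg h8]; exact h
  · rename_i h7; rw [if_neg h7]; exact hprim _ h

/-- More fuel does not change an answer of the main loop. -/
theorem loop_mono {cfg : Config} {js : List UInt8} {n fuel fuel' : Nat} {s : St} {r : Int × St}
    (h : loop cfg js n fuel s = some r) (hle : fuel ≤ fuel') : loop cfg js n fuel' s = some r := by
  induction fuel generalizing s fuel' with
  | zero => simp [loop] at h
  | succ f ih =>
    obtain ⟨f', rfl⟩ : ∃ f', fuel' = f' + 1 := ⟨fuel' - 1, by omega⟩
    have hf : f ≤ f' := by omega
    rw [loop] at h ⊢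
    split
    · rename_i hm
      rw [if_pos hm] at h
      cases hb : body cfg js (f + 1) n s (charAt js s.p.pos) with
      | none => simp [hb] at h
      | some st =>
        rw [body_mono hb hle]
        rw [hb] at h
        cases st with
        | ret r s' => exact h
        | next s' => exact ih h hf
    · rename_i hm
      rw [if_neg hm] at h; exact h

/-- More fuel does not change an answer of `parseFuel`. -/
theorem parseFuel_mono {cfg : Config} {js : List UInt8} {fuel fuel' : Nat} {p : Parser} {toks : Option Tokens} {n : Nat}
    {r : Int × Parser × Option Tokens}
    (h : parseFuel cfg fuel js p toks n = some r) (hle : fuel ≤ fuel') : parseFuel cfg fuel' js p toks n = some r := by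
  unfold parseFuel at h ⊢
  cases hl : loop cfg js n fuel ⟨p, toks, i32 p.toknext⟩ with
  | none => simp [hl] at h
  | some x => rw [loop_mono hl hle]; rw [hl] at h; exact h

/-! ### 2. progress of the main loop's body -/

/-- A character that no earlier `case` of jsmn_parse's `switch` took is not a stop character of jsmn_parse_primitive. -/
theorem primStop_of_not {cfg : Config} {c : UInt8} (h2 : ¬(c == 0x7d || c == 0x5d) = true)
    (h4 : ¬(c == 0x09 || c == 0x0d || c == 0x0a || c == 0x20) = true) (h5 : ¬(c == 0x3a) = true) (h6 : ¬(c == 0x2c) = true) :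
    primStop cfg c = false := by
  simp only [Bool.or_eq_true, beq_iff_eq, not_or] at h2 h4 h5 h6
  simp [primStop, h2, h4, h5, h6]

/-- What a trip through the body that goes on leaves in `pos`, `count` and `toknext`. -/
structure Progress (js : List UInt8) (s s' : St) : Prop where
  posLo : s.p.pos ≤ s'.p.pos
  posHi : s'.p.pos < js.length
  count : (s'.count = s.count ∧ s'.p.toknext = s.p.toknext) ∨
    (s'.count = i32 (s.count + 1) ∧ s'.p.toknext = s.p.toknext + (if s.toks.isSome then 1 else 0))

/-- `case '{': case '[':` when the loop goes on: `pos` unchanged, `count` one more, one token allocated (none in counting mode). -/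
theorem openBracket_next {cfg : Config} {n : Nat} {s s' : St} {c : UInt8} (h : Inv cfg s.p s.toks n)
    (hst : openBracket cfg c n s = .next s') :
    s'.p.pos = s.p.pos ∧ s'.count = i32 (s.count + 1) ∧ s'.p.toknext = s.p.toknext + (if s.toks.isSome then 1 else 0) := by
  obtain ⟨p, toks, count⟩ := s
  dsimp only at h ⊢
  unfold openBracket at hst
  cases toks with
  | none => cases hst; exact ⟨rfl, rfl, rfl⟩
  | some ts =>
    simp only at hst
    cases ha : allocToken cfg p ts n with
    | none => rw [ha] at hst; cases hst
    | some x =>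
      obtain ⟨i, p1, ts1⟩ := x
      have ⟨hi, hin, htn, hpos, hsup, hT1, hlen⟩ := alloc_tok h.tok ha
      rw [ha] at hst
      simp only at hst
      have : s'.p.pos = p1.pos ∧ s'.count = i32 (count + 1) ∧ s'.p.toknext = p1.toknext := by
        split at hst
        · split at hst
          · cases hst
          · cases hst; exact ⟨rfl, rfl, rfl⟩
        · cases hst; exact ⟨rfl, rfl, rfl⟩
      simp only [Option.isSome_some, if_true]
      omega

/-- `case '}': case ']':` without parent links changes neither `pos` nor `count` nor `toknext`. -/
theorem closeScan_next {type : Nat} {s s' : St} {ts : Tokens} (hst : closeScan type s ts = .next s') :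
    s'.p.pos = s.p.pos ∧ s'.count = s.count ∧ s'.p.toknext = s.p.toknext := by
  unfold closeScan at hst
  simp only at hst
  repeat' split at hst
  all_goals first | (cases hst; done) | (cases hst; exact ⟨rfl, rfl, rfl⟩)

/-- `case '}': case ']':` with parent links changes neither `pos` nor `count` nor `toknext`. -/
theorem closeLinks_next {type : Nat} {s s' : St} {ts : Tokens} {fuel : Nat} {idx : Int}
    (hst : closeLinks type s ts fuel idx = some (.next s')) :
    s'.p.pos = s.p.pos ∧ s'.count = s.count ∧ s'.p.toknext = s.p.toknext := by
  induction fuel generalizing idx with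
  | zero => simp [closeLinks] at hst
  | succ f ih =>
    rw [closeLinks] at hst
    simp only at hst
    repeat' split at hst
    all_goals first | (cases hst; done) | (cases hst; exact ⟨rfl, rfl, rfl⟩) | exact ih hst

/-- `case ',':` changes neither `pos` nor `count` nor `toknext`. -/
theorem comma_next {cfg : Config} {s s' : St} (hst : comma cfg s = .next s') :
    s'.p.pos = s.p.pos ∧ s'.count = s.count ∧ s'.p.toknext = s.p.toknext := by
  unfold comma at hst
  simp only at hst
  repeat' split at hst
  all_goals first | (cases hst; done) | (cases hst; exact ⟨rfl, rfl, rfl⟩)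

/-- A trip that changes neither `pos` nor `count` nor `toknext`. -/
theorem Progress.same {js : List UInt8} {s s' : St} (hlt : s.p.pos < js.length)
    (h : s'.p.pos = s.p.pos ∧ s'.count = s.count ∧ s'.p.toknext = s.p.toknext) : Progress js s s' :=
  ⟨by omega, by omega, Or.inl ⟨h.2.1, h.2.2⟩⟩

/-- What follows a successful sub-parser in jsmn_parse (see `afterSub_ok`), when the loop goes on. -/
theorem afterSub_next {js : List UInt8} {s s' : St} {r : Int} {p' : Parser} {toks' : Option Tokens}
    (hst : (if r < 0 then some (Step.ret r ⟨p', toks', s.count⟩) else some (Step.next ⟨p', bumpSuper p' toks', i32 (s.count + 1)⟩))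
      = some (.next s'))
    (hres : ¬ r < 0 → s.p.pos ≤ p'.pos ∧ p'.pos < js.length ∧ p'.toknext = s.p.toknext + (if s.toks.isSome then 1 else 0)) :
    Progress js s s' := by
  split at hst
  · cases hst
  · rename_i hr
    cases hst
    have := hres hr
    exact ⟨this.1, this.2.1, Or.inr ⟨rfl, this.2.2⟩⟩

/-- **Every trip through the body of jsmn_parse's loop that goes on** leaves `pos` inside the text and not before where it was, and
`count` and `toknext` unchanged or both one more (`toknext` stays in counting mode). -/
theorem body_next {cfg : Config} {js : List UInt8} (hlen : js.length < 4294967296) {fuel n : Nat} {s s' : St}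
    (h : Inv cfg s.p s.toks n) (hm : more js s.p.pos = true)
    (hst : body cfg js fuel n s (charAt js s.p.pos) = some (.next s')) : Progress js s s' := by
  have hlt := more_lt hm
  have hprim : ∀ st, primStop cfg (charAt js s.p.pos) = false → primitiveCase cfg js fuel n s = some (.next st) →
      Progress js s st := by
    intro st hstop hpc
    unfold primitiveCase at hpc
    split at hpc
    · cases hpc
    · rename_i r p' toks' hp
      exact afterSub_next hpc fun hr => parsePrimitive_next hlen h hm hstop hp hr
  unfold body at hst
  split at hst
  · simp only [Option.some.injEq] at hst
    have := openBracket_next h hst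
    exact ⟨by omega, by omega, Or.inr ⟨this.2.1, this.2.2⟩⟩
  split at hst
  · unfold closeBracket at hst
    split at hst
    · cases hst; exact Progress.same hlt ⟨rfl, rfl, rfl⟩
    · simp only at hst
      split at hst
      · split at hst
        · cases hst
        · exact Progress.same hlt (closeLinks_next hst)
      · simp only [Option.some.injEq] at hst
        exact Progress.same hlt (closeScan_next hst)
  split at hst
  · split at hst
    · cases hst
    · rename_i r p' toks' hp
      exact afterSub_next hst fun hr => by
        have := parseString_next hlen h hlt hp hr
        exact ⟨by omega, this.2⟩
  rename_i h2 _
  split at hst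
  · cases hst; exact Progress.same hlt ⟨rfl, rfl, rfl⟩
  rename_i h4
  split at hst
  · cases hst; exact Progress.same hlt ⟨rfl, rfl, rfl⟩
  rename_i h5
  split at hst
  · simp only [Option.some.injEq] at hst
    exact Progress.same hlt (comma_next hst)
  rename_i h6
  have hstop := primStop_of_not (cfg := cfg) h2 h4 h5 h6
  split at hst
  · split at hst
    · simp only at hst
      split at hst
      · simp only [Bool.false_eq_true, if_false] at hst; exact hprim _ hstop hst
      · split at hst
        · cases hst
        · exact hprim _ hstop hst
    · cases hst
  · exact hprim _ hstop hst

/-! ### 3. termination -/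

/-- `case '}': case ']':` always ends. -/
theorem closeBracket_total {cfg : Config} {n : Nat} {s : St} (c : UInt8) (h : Inv cfg s.p s.toks n) :
    ∃ st, closeBracket cfg c s = some st := by
  unfold closeBracket
  split
  · exact ⟨_, rfl⟩
  · rename_i ts hts
    simp only
    split
    · rename_i hpl
      split
      · exact ⟨_, rfl⟩
      · have hT : TokInv cfg s.p ts n := h.toks ts hts
        exact closeLinks_total hpl hT (by omega) (by omega) (by omega)
    · exact ⟨_, rfl⟩

/-- **One trip through the body of the loop ends** when the fuel covers the rest of the text. -/
theorem body_total {cfg : Config} {js : List UInt8} (hlen : js.length < 4294967296) {fuel n : Nat} {s : St} (c : UInt8)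
    (h : Inv cfg s.p s.toks n) (hm : more js s.p.pos = true) (hfuel : js.length - s.p.pos + 1 ≤ fuel) :
    ∃ st, body cfg js fuel n s c = some st := by
  have hlt := more_lt hm
  have hprim : ∃ st, primitiveCase cfg js fuel n s = some st := by
    unfold primitiveCase
    have ⟨x, hx⟩ := parsePrimitive_total (cfg := cfg) (n := n) (toks := s.toks) hlen hfuel
    rw [hx]
    obtain ⟨r, p', toks'⟩ := x
    simp only
    split <;> exact ⟨_, rfl⟩
  unfold body
  split
  · exact ⟨_, rfl⟩
  split
  · exact closeBracket_total _ h
  split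
  · have ⟨x, hx⟩ := parseString_total (cfg := cfg) (n := n) (toks := s.toks) (fuel := fuel) hlen hlt (by omega)
    rw [hx]
    obtain ⟨r, p', toks'⟩ := x
    simp only
    split <;> exact ⟨_, rfl⟩
  split
  · exact ⟨_, rfl⟩
  split
  · exact ⟨_, rfl⟩
  split
  · exact ⟨_, rfl⟩
  split
  · split
    · simp only
      split
      · simp only [Bool.false_eq_true, if_false]; exact hprim
      · split
        · exact ⟨_, rfl⟩
        · exact hprim
    · exact ⟨_, rfl⟩
  · exact hprim

/-- The main loop ends when the fuel covers the rest of the text: every trip advances `pos` by at least 1 and never past the end. -/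
theorem loop_total {cfg : Config} {js : List UInt8} (hlen : js.length < 4294967296) {n : Nat} (fuel : Nat) (s : St)
    (h : Inv cfg s.p s.toks n) (hc : IsI32 s.count) (hfuel : js.length - s.p.pos + 1 ≤ fuel) :
    ∃ x, loop cfg js n fuel s = some x := by
  induction fuel generalizing s with
  | zero => omega
  | succ f ih =>
    rw [loop]
    split
    · rename_i hm
      have ⟨st, hst⟩ := body_total (cfg := cfg) (n := n) hlen (charAt js s.p.pos) h hm hfuel
      rw [hst]
      cases st with
      | ret r s1 => exact ⟨_, rfl⟩
      | next s1 =>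
        simp only
        have ⟨a, b, _⟩ := body_ok _ h hc _ hst
        have pr := body_next hlen h hm hst
        have hu : u32 ((s1.p.pos : Int) + 1) = s1.p.pos + 1 := u32_succ (by have := pr.posHi; omega)
        apply ih
        · exact a.setPos _ (u32_lt _)
        · exact b
        · simp only [hu]
          have := pr.posLo; have := pr.posHi
          omega
    · exact ⟨_, rfl⟩

/-- **jsmn_parse always stops**: on a text shorter than 2^32 bytes, from a state satisfying the precondition `Inv`, the `js.length + 1`
rounds that `parse` allows its loops are enough. -/
theorem parse_total (cfg : Config) (js : List UInt8) (p : Parser) (toks : Option Tokens) (n : Nat) (hlen : js.length < 4294967296)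
    (hinv : Inv cfg p toks n) : ∃ res, parse cfg js p toks n = some res := by
  unfold parse parseFuel
  have ⟨x, hx⟩ := loop_total (cfg := cfg) hlen (js.length + 1) ⟨p, toks, i32 p.toknext⟩ hinv (i32_range _) (by simp only; omega)
  rw [hx]
  exact ⟨_, rfl⟩

/-! ### 4. the result -/

/-- After the loop jsmn_parse returns `count` or JSMN_ERROR_PART. -/
theorem finish_cases (s : St) : finish s = s.count ∨ finish s = JSMN_ERROR_PART := by
  unfold finish
  split
  · exact Or.inl rfl
  · simp only
    split
    · exact Or.inl rfl
    · split
      · exact Or.inr rfl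
      · exact Or.inl rfl

/-- The result of the main loop, when `count` cannot overflow (`t0 + js.length < 2^31`, `t0` the value of `toknext` on entry): an error
code, or `count`, which is not negative and, with a token array, equal to `toknext`. -/
theorem loop_result {cfg : Config} {js : List UInt8} (hlen : js.length < 4294967296) {n : Nat} (t0 : Nat)
    (hsmall : t0 + js.length < 2147483648) (fuel : Nat) (s : St) (h : Inv cfg s.p s.toks n)
    (hc0 : (t0 : Int) ≤ s.count) (hc1 : s.count ≤ t0 + s.p.pos) (hct : s.toks ≠ none → s.count = s.p.toknext)
    (r : Int) (s' : St) (hl : loop cfg js n fuel s = some (r, s')) :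
    IsResult r ∧ (s.toks ≠ none → 0 ≤ r → r = s'.p.toknext) := by
  induction fuel generalizing s with
  | zero => simp [loop] at hl
  | succ f ih =>
    rw [loop] at hl
    split at hl
    · rename_i hm
      have hlt := more_lt hm
      have hc : IsI32 s.count := ⟨by omega, by omega⟩
      split at hl
      · cases hl
      · rename_i r1 s1 hb
        cases hl
        have ⟨_, b, _⟩ := body_ok _ h hc _ hb
        refine ⟨Or.inr b, fun _ h0 => ?_⟩
        rcases b with b | b | b <;> rw [b] at h0 <;> exact absurd h0 (by decide)
      · rename_i s1 hb
        have ⟨a, b, c⟩ := body_ok _ h hc _ hb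
        have pr := body_next hlen h hm hb
        have hlo := pr.posLo
        have hhi := pr.posHi
        have hu : u32 ((s1.p.pos : Int) + 1) = s1.p.pos + 1 := u32_succ (by omega)
        have hi : i32 (s.count + 1) = s.count + 1 := i32_of_range (by omega) (by omega)
        have hne : s1.toks ≠ none ↔ s.toks ≠ none := not_congr c
        have := ih { s1 with p := { s1.p with pos := u32 (s1.p.pos + 1) } } (a.setPos _ (u32_lt _))
          (by rcases pr.count with ⟨e, _⟩ | ⟨e, _⟩ <;> simp only [e, hi] <;> omega)
          (by simp only [hu]; rcases pr.count with ⟨e, _⟩ | ⟨e, _⟩ <;> simp only [e, hi] <;> omega)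
          (by
            intro hs1
            have hs := hne.1 hs1
            have hct' := hct hs
            have hsome : s.toks.isSome = true := by
              cases hts : s.toks with
              | none => exact absurd hts hs
              | some _ => rfl
            simp only
            rcases pr.count with ⟨e, e'⟩ | ⟨e, e'⟩
            · rw [e, e']; exact hct'
            · rw [e, e', hi, hsome]; simp only [if_true]; omega)
          hl
        exact ⟨this.1, fun hs => this.2 (hne.2 hs)⟩
    · simp only [Option.some.injEq, Prod.mk.injEq] at hl
      obtain ⟨h1, h2⟩ := hl
      rw [← h1, ← h2]
      rcases finish_cases s with e | e
      · rw [e]; exact ⟨Or.inl (by omega), fun hs _ => hct hs⟩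
      · rw [e]; exact ⟨Or.inr (Or.inr (Or.inr rfl)), fun _ h0 => absurd h0 (by decide)⟩

/-- **What jsmn_parse returns**: a count that is not negative, or one of the three error codes — provided `count` cannot overflow
(`toknext + js.length < 2^31`); and with a token array a non-negative result is the new value of `toknext`, the number of tokens in use. -/
theorem parse_result (cfg : Config) (js : List UInt8) (p : Parser) (toks : Option Tokens) (n : Nat) (hlen : js.length < 4294967296)
    (hinv : Inv cfg p toks n) (hsmall : p.toknext + js.length < 2147483648) {r : Int} {p' : Parser} {toks' : Option Tokens}
    (h : parse cfg js p toks n = some (r, p', toks')) : IsResult r ∧ (toks ≠ none → 0 ≤ r → r = (p'.toknext : Int)) := by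
  unfold parse parseFuel at h
  cases hl : loop cfg js n (js.length + 1) ⟨p, toks, i32 p.toknext⟩ with
  | none => simp [hl] at h
  | some x =>
    obtain ⟨r1, s1⟩ := x
    simp only [hl, Option.map_some, Option.some.injEq, Prod.mk.injEq] at h
    obtain ⟨rfl, rfl, rfl⟩ := h
    have hi : i32 (p.toknext : Int) = p.toknext := i32_of_range (by omega) (by omega)
    exact loop_result hlen p.toknext hsmall _ ⟨p, toks, i32 p.toknext⟩ hinv (by simp only [hi]; omega) (by simp only [hi]; omega)
      (fun _ => hi) _ _ hl

end Jsmn
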